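-- pv_equiv track=rewrite | github.com/frw/2048-DRL | Other/Code for Different Experiment Methods (not commented or cleaned up)/pca_binary/rl/reinforcement_learner.py | get_rotated_boards
-- ===== SOURCE A (Python) =====
-- def get_rotated_boards(this_state, which_rotations):
--     #for which_rotations:
--     #1 gives 180 degree turn
--     #2 gives 90 degree turn clockwise (possible_move left for self.last_action for original state!!!)
--     #3 gives 90 degree turn CCW
--
--     #returns list of processed tuples
--
--     rotated_boards = []
--
--     for move in which_rotations:
--         if move == 0:
--             rotated_boards.append(this_state)
--         elif move == 1:
--             new_board = [0,0,0,0,0,0,0,0,0,0,0,0,0,0,0,0]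
--             map_dictionary = [15,14,13,12,11,10,9,8,7,6,5,4,3,2,1,0]
--             for i in range(16):
--                 new_board[i] = this_state[map_dictionary[i]]
--             rotated_boards.append(tuple(new_board))
--         elif move == 2:
--             new_board = [0,0,0,0,0,0,0,0,0,0,0,0,0,0,0,0]
--             map_dictionary = [12,8,4,0,13,9,5,1,14,10,6,2,15,11,7,3]
--             for i in range(16):
--                 new_board[i] = this_state[map_dictionary[i]]
--             rotated_boards.append(tuple(new_board))
--         elif move == 3:
--             new_board = [0,0,0,0,0,0,0,0,0,0,0,0,0,0,0,0]
--             map_dictionary = [3,7,11,15,2,6,10,14,1,5,9,13,0,4,8,12]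
--             for i in range(16):
--                 new_board[i] = this_state[map_dictionary[i]]
--             rotated_boards.append(tuple(new_board))
--     return rotated_boards
-- ===== SOURCE B (Python) =====
-- def get_rotated_boards(this_state, which_rotations):
--     # Geometric decomposition: split the flat state into four rows and build each
--     # rotation from row reversal and zip-transpose instead of flat index tables.
--     out = []
--     for move in which_rotations:
--         if move == 0:
--             out.append(this_state)
--         elif move in (1, 2, 3):
--             r0, r1, r2, r3 = (this_state[i:i + 4] for i in range(0, 16, 4))
--             if move == 1:        # 180 degrees: reverse row order and each row
--                 rot = [r3[::-1], r2[::-1], r1[::-1], r0[::-1]]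
--             elif move == 2:      # 90 CW: transpose, then reverse each row
--                 rot = [list(col)[::-1] for col in zip(r0, r1, r2, r3)]
--             else:                # 90 CCW: transpose, then reverse row order
--                 rot = list(zip(r0, r1, r2, r3))[::-1]
--             out.append(tuple(v for row in rot for v in row))
--     return out
-- ===== Notes on version B (the rewrite author's own statement) =====
-- stated objective: idiomatic
-- what changed: Replaces the three hardcoded 16-entry flat permutation tables (each applied by mutating a zero-filled board) with a geometric decomposition: the state is split into four rows and each rotation is built from row reversal and zip-transpose.
import Mathlib
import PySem

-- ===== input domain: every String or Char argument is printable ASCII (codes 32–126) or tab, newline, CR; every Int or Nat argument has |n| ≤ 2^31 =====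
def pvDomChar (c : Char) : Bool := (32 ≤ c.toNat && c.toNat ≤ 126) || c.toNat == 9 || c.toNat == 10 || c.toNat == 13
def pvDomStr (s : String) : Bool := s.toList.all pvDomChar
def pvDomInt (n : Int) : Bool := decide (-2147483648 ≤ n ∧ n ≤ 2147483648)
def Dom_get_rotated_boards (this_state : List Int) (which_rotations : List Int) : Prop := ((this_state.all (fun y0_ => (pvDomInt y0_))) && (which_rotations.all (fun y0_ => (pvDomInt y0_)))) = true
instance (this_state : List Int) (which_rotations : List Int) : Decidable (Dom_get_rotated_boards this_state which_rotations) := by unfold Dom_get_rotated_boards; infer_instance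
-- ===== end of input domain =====

-- B builds each rotation geometrically from the four board rows (row reversal and
-- zip-transpose) instead of A's hardcoded flat permutation tables; equal value on Pre_.

-- ===== PORT A =====
-- A's inner loop: new_board[i] = this_state[map_dictionary[i]] for i in range(16)
def pvRotA (this_state map_dictionary : List Int) : List Int :=
  (PySem.List.pyRange 0 16 1).foldl
    (fun nb i =>
      PySem.List.pySetD nb i (PySem.List.pyGetD this_state (PySem.List.pyGetD map_dictionary i 0) 0))
    [0,0,0,0,0,0,0,0,0,0,0,0,0,0,0,0]

def get_rotated_boards (this_state : List Int) (which_rotations : List Int) : List (List Int) :=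
  which_rotations.foldl
    (fun rotated_boards move =>
      if move = 0 then rotated_boards ++ [this_state]
      else if move = 1 then
        rotated_boards ++ [pvRotA this_state [15,14,13,12,11,10,9,8,7,6,5,4,3,2,1,0]]
      else if move = 2 then
        rotated_boards ++ [pvRotA this_state [12,8,4,0,13,9,5,1,14,10,6,2,15,11,7,3]]
      else if move = 3 then
        rotated_boards ++ [pvRotA this_state [3,7,11,15,2,6,10,14,1,5,9,13,0,4,8,12]]
      else rotated_boards)
    []

-- ===== PORT B =====
-- zip(r0, r1, r2, r3): truncating 4-way zip, hand-ported
def pvZip4 : List Int → List Int → List Int → List Int → List (List Int)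
  | a :: as, b :: bs, c :: cs, d :: ds => [a, b, c, d] :: pvZip4 as bs cs ds
  | _, _, _, _ => []

def get_rotated_boards_alt (this_state : List Int) (which_rotations : List Int) : List (List Int) :=
  which_rotations.foldl
    (fun out move =>
      if move = 0 then out ++ [this_state]
      else if move = 1 ∨ move = 2 ∨ move = 3 then
        let r0 := PySem.List.slice this_state (some 0) (some 4)
        let r1 := PySem.List.slice this_state (some 4) (some 8)
        let r2 := PySem.List.slice this_state (some 8) (some 12)
        let r3 := PySem.List.slice this_state (some 12) (some 16)
        let rot :=
          if move = 1 then [r3.reverse, r2.reverse, r1.reverse, r0.reverse]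
          else if move = 2 then (pvZip4 r0 r1 r2 r3).map List.reverse
          else (pvZip4 r0 r1 r2 r3).reverse
        out ++ [rot.flatMap id]
      else out)
    []

-- ===== PRECONDITION & SPEC =====
-- A raises IndexError (this_state[15] out of range) whenever a rotation move 1/2/3 occurs
-- and the board has fewer than 16 cells; exactly those inputs are excluded.
def Pre_get_rotated_boards (this_state : List Int) (which_rotations : List Int) : Prop :=
  (which_rotations.any (fun m => m == 1 || m == 2 || m == 3)) = true → 16 ≤ this_state.length
instance (this_state : List Int) (which_rotations : List Int) : Decidable (Pre_get_rotated_boards this_state which_rotations) := by unfold Pre_get_rotated_boards; infer_instance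

def pvWitness_get_rotated_boards : List Int × List Int :=
  ([0,1,2,3,4,5,6,7,8,9,10,11,12,13,14,15], [0,1,2,3])

def Spec_get_rotated_boards (this_state : List Int) (which_rotations : List Int) (out : List (List Int)) : Prop := out = get_rotated_boards_alt this_state which_rotations
instance (this_state : List Int) (which_rotations : List Int) (out : List (List Int)) : Decidable (Spec_get_rotated_boards this_state which_rotations out) := by unfold Spec_get_rotated_boards; infer_instance

-- ===== CLAIM (what is proved, stated in full; the proofs are below) =====
def Claim_equal_get_rotated_boards : Prop := ∀ (this_state : List Int) (which_rotations : List Int), Dom_get_rotated_boards this_state which_rotations → Pre_get_rotated_boards this_state which_rotations → Spec_get_rotated_boards this_state which_rotations (get_rotated_boards this_state which_rotations)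

-- ===== LEMMAS AND PROOFS =====

theorem pv_cons (s : List Int) (n : Nat) (h : n + 1 ≤ s.length) :
    ∃ a t, s = a :: t ∧ n ≤ t.length := by
  cases s with
  | nil => simp at h
  | cons a t => exact ⟨a, t, rfl, by simpa using h⟩

theorem rots_eq (s : List Int) (h : 16 ≤ s.length) :
    pvRotA s [15,14,13,12,11,10,9,8,7,6,5,4,3,2,1,0]
        = ([(PySem.List.slice s (some 12) (some 16)).reverse,
            (PySem.List.slice s (some 8) (some 12)).reverse,
            (PySem.List.slice s (some 4) (some 8)).reverse,
            (PySem.List.slice s (some 0) (some 4)).reverse] : List (List Int)).flatMap id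
    ∧ pvRotA s [12,8,4,0,13,9,5,1,14,10,6,2,15,11,7,3]
        = ((pvZip4 (PySem.List.slice s (some 0) (some 4)) (PySem.List.slice s (some 4) (some 8))
              (PySem.List.slice s (some 8) (some 12)) (PySem.List.slice s (some 12) (some 16))).map
            List.reverse).flatMap id
    ∧ pvRotA s [3,7,11,15,2,6,10,14,1,5,9,13,0,4,8,12]
        = ((pvZip4 (PySem.List.slice s (some 0) (some 4)) (PySem.List.slice s (some 4) (some 8))
              (PySem.List.slice s (some 8) (some 12)) (PySem.List.slice s (some 12) (some 16))).reverse).flatMap id := by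
  obtain ⟨a0, s, rfl, h⟩ := pv_cons s 15 h
  obtain ⟨a1, s, rfl, h⟩ := pv_cons s 14 (by simpa using h)
  obtain ⟨a2, s, rfl, h⟩ := pv_cons s 13 (by simpa using h)
  obtain ⟨a3, s, rfl, h⟩ := pv_cons s 12 (by simpa using h)
  obtain ⟨a4, s, rfl, h⟩ := pv_cons s 11 (by simpa using h)
  obtain ⟨a5, s, rfl, h⟩ := pv_cons s 10 (by simpa using h)
  obtain ⟨a6, s, rfl, h⟩ := pv_cons s 9 (by simpa using h)
  obtain ⟨a7, s, rfl, h⟩ := pv_cons s 8 (by simpa using h)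
  obtain ⟨a8, s, rfl, h⟩ := pv_cons s 7 (by simpa using h)
  obtain ⟨a9, s, rfl, h⟩ := pv_cons s 6 (by simpa using h)
  obtain ⟨a10, s, rfl, h⟩ := pv_cons s 5 (by simpa using h)
  obtain ⟨a11, s, rfl, h⟩ := pv_cons s 4 (by simpa using h)
  obtain ⟨a12, s, rfl, h⟩ := pv_cons s 3 (by simpa using h)
  obtain ⟨a13, s, rfl, h⟩ := pv_cons s 2 (by simpa using h)
  obtain ⟨a14, s, rfl, h⟩ := pv_cons s 1 (by simpa using h)
  obtain ⟨a15, s, rfl, h⟩ := pv_cons s 0 (by simpa using h)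
  refine ⟨?_, ?_, ?_⟩ <;>
    simp [pvRotA, pvZip4,
          show PySem.List.pyRange 0 16 1 = ((List.range 16).map (Nat.cast : Nat → Int)) from by decide,
          List.range_succ, PySem.List.pyGetD_ofNat', PySem.List.pySetD_of_nonneg,
          PySem.List.slice_toNat]

-- ===== VERDICT (by name: the statement is the Claim_ definition above) =====
theorem get_rotated_boards_spec : Claim_equal_get_rotated_boards := by
  intro s wr _ hpre
  unfold Spec_get_rotated_boards get_rotated_boards get_rotated_boards_alt
  apply PySem.List.foldl_congr_mem
  intro acc m hm
  by_cases h0 : m = 0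
  · simp [h0]
  · by_cases h123 : m = 1 ∨ m = 2 ∨ m = 3
    · have hlen : 16 ≤ s.length := hpre (by
        simp only [List.any_eq_true]
        exact ⟨m, hm, by rcases h123 with h | h | h <;> simp [h]⟩)
      obtain ⟨e1, e2, e3⟩ := rots_eq s hlen
      rcases h123 with h | h | h <;> simp [h, e1, e2, e3]
    · push Not at h123
      simp [h0, h123.1, h123.2.1, h123.2.2]
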